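-- pv_equiv track=rewrite | github.com/fe-jcorreia/algorithms-and-data-structures | exercices/658-findClosestElements.py | findClosestElements_old
-- ===== SOURCE A (Python) =====
-- import heapq
--
-- def findClosestElements_old(arr, k, x):
--   heap = []
--   ans = []
--
--   for num in arr: heapq.heappush(heap, (abs(num - x), num))
--   for _ in range(k):
--     _, num = heapq.heappop(heap)
--     ans.append(num)
--
--   return sorted(ans)
-- ===== SOURCE B (Python) =====
-- def findClosestElements_old(arr, k, x):
--     nearest = sorted(arr, key=lambda v: (abs(v - x), v))
--     return sorted(nearest[:max(k, 0)])
-- ===== Notes on version B (the rewrite author's own statement) =====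
-- stated objective: alternative
-- what changed: replaces the heap build + k heappops with one stable sort of the values by the key (abs(v-x), v) followed by a prefix slice
import Mathlib
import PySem

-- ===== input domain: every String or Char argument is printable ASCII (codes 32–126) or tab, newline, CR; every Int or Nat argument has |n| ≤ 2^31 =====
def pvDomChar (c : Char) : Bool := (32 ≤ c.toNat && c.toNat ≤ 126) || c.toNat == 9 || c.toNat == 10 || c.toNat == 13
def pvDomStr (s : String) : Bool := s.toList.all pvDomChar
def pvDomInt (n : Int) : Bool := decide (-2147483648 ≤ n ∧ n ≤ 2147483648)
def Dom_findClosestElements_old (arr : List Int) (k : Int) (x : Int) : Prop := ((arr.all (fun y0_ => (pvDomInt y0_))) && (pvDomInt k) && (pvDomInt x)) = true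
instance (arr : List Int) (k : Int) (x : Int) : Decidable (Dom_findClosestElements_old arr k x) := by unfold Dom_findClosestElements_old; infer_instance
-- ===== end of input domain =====

-- B replaces A's heap build + k heappops by one stable sort of the values by the
-- key (abs(v-x), v) and a prefix slice (objective: alternative, same O(n log n) cost).

-- ===== PORT A =====
-- heapq.heappush / heapq.heappop are standard-library calls, ported by their
-- contract: the heap holds the multiset of pushed pairs and heappop removes and
-- returns the smallest pair in Python's tuple (lexicographic) order. Exact here:
-- pairs with equal keys are identical values, so which copy the binary heap
-- returns is unobservable.
def pvHeapPop (h : List (Int × Int)) : Option ((Int × Int) × List (Int × Int)) :=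
  match PySem.List.min2? h (fun p => p.1) (fun p => p.2) with
  | none => none                     -- heappop of the empty heap: IndexError
  | some m => some (m, h.erase m)

def findClosestElements_old (arr : List Int) (k : Int) (x : Int) : List Int :=
  let heap := arr.foldl (fun h num => h ++ [(|num - x|, num)]) []
  let st := (PySem.List.pyRange 0 k 1).foldl
      (fun (st : List Int × List (Int × Int)) _ =>
        match pvHeapPop st.2 with
        | none => st                 -- Python raises IndexError here: outside Pre_
        | some (p, h') => (st.1 ++ [p.2], h')) ([], heap)
  PySem.List.sorted st.1 (fun v => v) false

-- ===== PORT B =====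
def findClosestElements_old_alt (arr : List Int) (k : Int) (x : Int) : List Int :=
  let nearest := PySem.List.sorted2 arr (fun v => |v - x|) (fun v => v) false
  PySem.List.sorted (PySem.List.slice nearest none (some (max k 0))) (fun v => v) false

-- ===== PRECONDITION & SPEC =====
-- Pre_ excludes exactly k > len(arr): there A's k-th heappop raises IndexError.
def Pre_findClosestElements_old (arr : List Int) (k : Int) (x : Int) : Prop :=
  k ≤ (arr.length : Int)
instance (arr : List Int) (k : Int) (x : Int) : Decidable (Pre_findClosestElements_old arr k x) := by
  unfold Pre_findClosestElements_old; infer_instance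

def pvWitness_findClosestElements_old : List Int × Int × Int := ([4, 1, 7, 2], 2, 3)

def Spec_findClosestElements_old (arr : List Int) (k : Int) (x : Int) (out : List Int) : Prop :=
  out = findClosestElements_old_alt arr k x
instance (arr : List Int) (k : Int) (x : Int) (out : List Int) : Decidable (Spec_findClosestElements_old arr k x out) := by
  unfold Spec_findClosestElements_old; infer_instance

-- ===== CLAIM (what is proved, stated in full; the proofs are below) =====
def Claim_equal_findClosestElements_old : Prop := ∀ (arr : List Int) (k : Int) (x : Int), Dom_findClosestElements_old arr k x → Pre_findClosestElements_old arr k x → Spec_findClosestElements_old arr k x (findClosestElements_old arr k x)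

-- ===== LEMMAS AND PROOFS =====

-- Python's tuple order on (distance, value) pairs, as a Prop.
def pvLt (a b : Int × Int) : Prop := a.1 < b.1 ∨ (a.1 = b.1 ∧ a.2 < b.2)
def pvLe (a b : Int × Int) : Prop := ¬ pvLt b a
def pvKey (x v : Int) : Int × Int := (|v - x|, v)
def pvVle (x v w : Int) : Prop := pvLe (pvKey x v) (pvKey x w)

theorem pvLt_irrefl (a : Int × Int) : ¬ pvLt a a := by simp [pvLt]

theorem pvLe_of_lt {a b : Int × Int} (h : pvLt a b) : pvLe a b := by
  simp only [pvLt, pvLe, not_or, not_and, not_lt] at *; omega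

theorem pvLe_trans {a b c : Int × Int} (h1 : pvLe a b) (h2 : pvLe b c) : pvLe a c := by
  simp only [pvLe, pvLt, not_or, not_and, not_lt] at *; omega

theorem pvLe_of_lt_of_le {a b c : Int × Int} (h1 : pvLt a b) (h2 : pvLe b c) : pvLe a c := by
  simp only [pvLe, pvLt, not_or, not_and, not_lt] at *; omega

theorem pvLe_of_le_of_lt {a b c : Int × Int} (h1 : pvLe a b) (h2 : pvLt b c) : pvLe a c := by
  simp only [pvLe, pvLt, not_or, not_and, not_lt] at *; omega

theorem pvLe_antisymm {a b : Int × Int} (h1 : pvLe a b) (h2 : pvLe b a) : a = b := by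
  simp only [pvLe, pvLt, not_or, not_and, not_lt] at *
  exact Prod.ext (by omega) (by omega)

theorem pvVle_antisymm {x v w : Int} (h1 : pvVle x v w) (h2 : pvVle x w v) : v = w := by
  have := pvLe_antisymm h1 h2
  simpa [pvKey] using congrArg Prod.snd this

-- the boolean lexicographic comparison used inside min2?
theorem pvLtB_iff (a b : Int × Int) :
    (decide (a.1 < b.1) || (!decide (b.1 < a.1) && decide (a.2 < b.2))) = true ↔ pvLt a b := by
  simp [pvLt]; omega

-- the accumulator step of min2?, named so that rewriting is syntactic
def pvStep (acc : Option (Int × Int)) (p : Int × Int) : Option (Int × Int) :=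
  match acc with
  | none => some p
  | some q =>
    if (decide (p.1 < q.1) || (!decide (q.1 < p.1) && decide (p.2 < q.2))) = true
    then some p else some q

theorem pv_min2_eq (h : List (Int × Int)) :
    PySem.List.min2? h (fun p => p.1) (fun p => p.2) = h.foldl pvStep none := by
  unfold PySem.List.min2?
  congr 1
  funext acc p
  cases acc with
  | none => rfl
  | some q => rfl

-- ---------- min2? returns a minimum ----------
theorem pv_min2_fold_spec (xs : List (Int × Int)) :
    ∀ (acc : Option (Int × Int)) m, xs.foldl pvStep acc = some m →
      (∀ y ∈ xs, ¬ pvLt y m) ∧ (∀ a, acc = some a → ¬ pvLt a m) ∧ (m ∈ xs ∨ acc = some m) := by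
  induction xs with
  | nil =>
    intro acc m h
    simp only [List.foldl_nil] at h
    subst h
    refine ⟨by simp, ?_, Or.inr rfl⟩
    intro a ha
    cases ha
    exact pvLt_irrefl m
  | cons z t ih =>
    intro acc m h
    simp only [List.foldl_cons] at h
    cases acc with
    | none =>
      rw [show pvStep none z = some z from rfl] at h
      obtain ⟨iha, ihb, ihc⟩ := ih (some z) m h
      have hz : ¬ pvLt z m := ihb z rfl
      refine ⟨fun y hy => ?_, ?_, ?_⟩
      · rcases List.mem_cons.mp hy with rfl | hyt
        · exact hz
        · exact iha y hyt
      · intro a ha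
        exact nomatch ha
      · rcases ihc with hm | hm
        · exact Or.inl (List.mem_cons_of_mem _ hm)
        · exact Or.inl (by cases hm; exact List.mem_cons_self)
    | some a =>
      rw [show pvStep (some a) z
            = if (decide (z.1 < a.1) || (!decide (a.1 < z.1) && decide (z.2 < a.2))) = true
              then some z else some a from rfl] at h
      by_cases hc : (decide (z.1 < a.1) || (!decide (a.1 < z.1) && decide (z.2 < a.2))) = true
      · rw [if_pos hc] at h
        obtain ⟨iha, ihb, ihc⟩ := ih (some z) m h
        have hzm : ¬ pvLt z m := ihb z rfl
        have hza : pvLt z a := (pvLtB_iff z a).mp hc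
        refine ⟨fun y hy => ?_, fun b hb => ?_, ?_⟩
        · rcases List.mem_cons.mp hy with rfl | hyt
          · exact hzm
          · exact iha y hyt
        · cases hb
          exact pvLe_of_le_of_lt hzm hza
        · rcases ihc with hm | hm
          · exact Or.inl (List.mem_cons_of_mem _ hm)
          · exact Or.inl (by cases hm; exact List.mem_cons_self)
      · rw [if_neg hc] at h
        obtain ⟨iha, ihb, ihc⟩ := ih (some a) m h
        have ham : ¬ pvLt a m := ihb a rfl
        have hza : ¬ pvLt z a := fun hh => hc ((pvLtB_iff z a).mpr hh)
        refine ⟨fun y hy => ?_, fun b hb => by cases hb; exact ham, ?_⟩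
        · rcases List.mem_cons.mp hy with rfl | hyt
          · exact pvLe_trans (a := m) ham hza
          · exact iha y hyt
        · rcases ihc with hm | hm
          · exact Or.inl (List.mem_cons_of_mem _ hm)
          · exact Or.inr hm

theorem pv_min2_fold_some (xs : List (Int × Int)) :
    ∀ (a : Int × Int), ∃ m, xs.foldl pvStep (some a) = some m := by
  induction xs with
  | nil => intro a; exact ⟨a, rfl⟩
  | cons z t ih =>
    intro a
    simp only [List.foldl_cons]
    rw [show pvStep (some a) z
          = if (decide (z.1 < a.1) || (!decide (a.1 < z.1) && decide (z.2 < a.2))) = true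
            then some z else some a from rfl]
    by_cases hc : (decide (z.1 < a.1) || (!decide (a.1 < z.1) && decide (z.2 < a.2))) = true
    · rw [if_pos hc]; exact ih z
    · rw [if_neg hc]; exact ih a

theorem pvHeapPop_spec {h : List (Int × Int)} {p : Int × Int} {h' : List (Int × Int)}
    (hp : pvHeapPop h = some (p, h')) :
    p ∈ h ∧ h' = h.erase p ∧ ∀ y ∈ h, ¬ pvLt y p := by
  unfold pvHeapPop at hp
  rw [pv_min2_eq] at hp
  cases hm : h.foldl pvStep none with
  | none => rw [hm] at hp; cases hp
  | some m =>
    rw [hm] at hp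
    simp only [Option.some.injEq, Prod.mk.injEq] at hp
    obtain ⟨h1, h2⟩ := hp
    subst h1
    subst h2
    obtain ⟨ha, _, hmem⟩ := pv_min2_fold_spec h none m hm
    rcases hmem with hmem | hmem
    · exact ⟨hmem, rfl, ha⟩
    · cases hmem

theorem pvHeapPop_some {h : List (Int × Int)} (hne : h ≠ []) :
    ∃ p h', pvHeapPop h = some (p, h') := by
  cases h with
  | nil => exact absurd rfl hne
  | cons z t =>
    unfold pvHeapPop
    rw [pv_min2_eq]
    simp only [List.foldl_cons]
    rw [show pvStep none z = some z from rfl]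
    obtain ⟨m, hm⟩ := pv_min2_fold_some t z
    rw [hm]
    exact ⟨m, _, rfl⟩

theorem pvHeapPop_length {h : List (Int × Int)} {p : Int × Int} {h' : List (Int × Int)}
    (hp : pvHeapPop h = some (p, h')) : h'.length + 1 = h.length := by
  obtain ⟨hmem, he, _⟩ := pvHeapPop_spec hp
  subst he
  rw [List.length_erase_of_mem hmem]
  have := List.length_pos_iff.mpr (List.ne_nil_of_mem hmem)
  omega

-- ---------- repeated heappop = selection sort ----------
def pvSelTake : Nat → List (Int × Int) → List (Int × Int)
  | 0, _ => []
  | n + 1, h =>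
    match pvHeapPop h with
    | none => []
    | some (p, h') => p :: pvSelTake n h'

theorem pvSelTake_succ (n : Nat) (h : List (Int × Int)) (p : Int × Int)
    (h' : List (Int × Int)) (hp : pvHeapPop h = some (p, h')) :
    pvSelTake (n + 1) h = p :: pvSelTake n h' := by
  rw [show pvSelTake (n + 1) h
      = (match pvHeapPop h with
         | none => []
         | some (p, h') => p :: pvSelTake n h') from rfl, hp]

theorem pvSelTake_subset {n : Nat} : ∀ {h : List (Int × Int)} {y}, y ∈ pvSelTake n h → y ∈ h := by
  induction n with
  | zero => intro h y hy; cases hy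
  | succ n ih =>
    intro h y hy
    unfold pvSelTake at hy
    cases hp : pvHeapPop h with
    | none => rw [hp] at hy; cases hy
    | some r =>
      obtain ⟨p, h'⟩ := r
      rw [hp] at hy
      obtain ⟨hmem, he, _⟩ := pvHeapPop_spec hp
      rcases List.mem_cons.mp hy with rfl | hy'
      · exact hmem
      · have := ih hy'
        rw [he] at this
        exact List.mem_of_mem_erase this

theorem pvSelTake_perm : ∀ (h : List (Int × Int)), (pvSelTake h.length h).Perm h := by
  intro h
  induction hn : h.length generalizing h with
  | zero => rw [List.length_eq_zero_iff.mp hn]; simp [pvSelTake]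
  | succ n ih =>
    have hne : h ≠ [] := by intro he; rw [he] at hn; simp at hn
    obtain ⟨p, h', hp⟩ := pvHeapPop_some hne
    obtain ⟨hmem, he, _⟩ := pvHeapPop_spec hp
    have hlen : h'.length = n := by have := pvHeapPop_length hp; omega
    unfold pvSelTake
    rw [hp]
    have hperm : (pvSelTake n h').Perm h' := ih h' hlen
    exact (hperm.cons p).trans (he ▸ (List.perm_cons_erase hmem)).symm

theorem pvSelTake_pairwise (n : Nat) : ∀ (h : List (Int × Int)), (pvSelTake n h).Pairwise pvLe := by
  induction n with
  | zero => intro h; simp [pvSelTake]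
  | succ n ih =>
    intro h
    unfold pvSelTake
    cases hp : pvHeapPop h with
    | none => simp
    | some r =>
      obtain ⟨p, h'⟩ := r
      obtain ⟨hmem, he, hmin⟩ := pvHeapPop_spec hp
      refine List.Pairwise.cons ?_ (ih h')
      intro y hy
      have hyh : y ∈ h := by
        have := pvSelTake_subset hy
        rw [he] at this
        exact List.mem_of_mem_erase this
      exact hmin y hyh

theorem pvSelTake_prefix : ∀ (n : Nat) (h : List (Int × Int)), n ≤ h.length →
    pvSelTake n h = (pvSelTake h.length h).take n := by
  suffices H : ∀ (m n : Nat) (h : List (Int × Int)), h.length = m → n ≤ m →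
      pvSelTake n h = (pvSelTake m h).take n by
    intro n h hn; exact H h.length n h rfl hn
  intro m
  induction m with
  | zero =>
    intro n h _ hn
    have : n = 0 := by omega
    subst this
    simp [pvSelTake]
  | succ m ih =>
    intro n h hm hn
    have hne : h ≠ [] := by intro he; rw [he] at hm; simp at hm
    obtain ⟨p, h', hp⟩ := pvHeapPop_some hne
    have hlen : h'.length = m := by have := pvHeapPop_length hp; omega
    cases n with
    | zero => simp [pvSelTake]
    | succ j =>
      have hj : j ≤ m := by omega
      show pvSelTake (j+1) h = (pvSelTake (m+1) h).take (j+1)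
      unfold pvSelTake
      rw [hp]
      simp only [List.take_succ_cons]
      rw [ih j h' hlen hj]

-- ---------- building the heap ----------
theorem pv_heap_build (x : Int) (arr : List Int) :
    ∀ acc, arr.foldl (fun h num => h ++ [(|num - x|, num)]) acc
      = acc ++ arr.map (fun v => (|v - x|, v)) := by
  induction arr with
  | nil => intro acc; simp
  | cons a t ih => intro acc; simp [ih]

-- ---------- the pop loop ----------
def pvLoopStep (st : List Int × List (Int × Int)) : List Int × List (Int × Int) :=
  match pvHeapPop st.2 with
  | none => st
  | some (p, h') => (st.1 ++ [p.2], h')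

theorem pv_loop (n : Nat) :
    ∀ (ans : List Int) (h : List (Int × Int)), n ≤ h.length →
      ∃ hr, pvLoopStep^[n] (ans, h) = (ans ++ (pvSelTake n h).map Prod.snd, hr) := by
  induction n with
  | zero => intro ans h _; exact ⟨h, by simp [pvSelTake]⟩
  | succ n ih =>
    intro ans h hn
    have hne : h ≠ [] := by intro he; rw [he] at hn; simp at hn
    obtain ⟨p, h', hp⟩ := pvHeapPop_some hne
    have hlen : n ≤ h'.length := by have := pvHeapPop_length hp; omega
    obtain ⟨hr, hrec⟩ := ih (ans ++ [p.2]) h' hlen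
    refine ⟨hr, ?_⟩
    rw [Function.iterate_succ_apply]
    have hstep : pvLoopStep (ans, h) = (ans ++ [p.2], h') := by
      unfold pvLoopStep
      rw [show ((ans, h) : List Int × List (Int × Int)).2 = h from rfl, hp]
    rw [hstep, hrec, pvSelTake_succ n h p h' hp]
    simp

theorem pv_foldl_ignore {α β : Type} (g : β → β) (l : List α) :
    ∀ st, l.foldl (fun s _ => g s) st = g^[l.length] st := by
  induction l with
  | nil => intro st; simp
  | cons a t ih => intro st; simp [ih, Function.iterate_succ_apply]

-- ---------- sorted2 is ordered by the lexicographic key ----------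
theorem pvVltB_iff (x a b : Int) :
    (decide (|a - x| < |b - x|) || (!decide (|b - x| < |a - x|) && decide (a < b))) = true
      ↔ pvLt (pvKey x a) (pvKey x b) := by
  simp only [pvLt, pvKey, Bool.or_eq_true, Bool.and_eq_true, Bool.not_eq_true',
    decide_eq_true_eq, decide_eq_false_iff_not, not_lt]
  constructor
  · rintro (h | ⟨h1, h2⟩)
    · exact Or.inl h
    · rcases lt_or_ge (|a - x|) (|b - x|) with hlt | hge
      · exact Or.inl hlt
      · exact Or.inr ⟨le_antisymm h1 hge, h2⟩
  · rintro (h | ⟨h1, h2⟩)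
    · exact Or.inl h
    · exact Or.inr ⟨le_of_eq h1, h2⟩

theorem pv_insertBy_pairwise (x v : Int) :
    ∀ (ys : List Int), ys.Pairwise (pvVle x) →
      (PySem.List.insertBy
        (fun a b => decide (|a - x| < |b - x|) || (!decide (|b - x| < |a - x|) && decide (a < b)))
        v ys).Pairwise (pvVle x) := by
  intro ys
  induction ys with
  | nil => intro _; simp [PySem.List.insertBy]
  | cons y t ih =>
    intro hys
    rw [show PySem.List.insertBy
          (fun a b => decide (|a - x| < |b - x|) || (!decide (|b - x| < |a - x|) && decide (a < b)))
          v (y :: t)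
        = if (decide (|v - x| < |y - x|) || (!decide (|y - x| < |v - x|) && decide (v < y))) = true
          then v :: y :: t
          else y :: PySem.List.insertBy
            (fun a b => decide (|a - x| < |b - x|) || (!decide (|b - x| < |a - x|) && decide (a < b)))
            v t from rfl]
    by_cases hc : (decide (|v - x| < |y - x|) || (!decide (|y - x| < |v - x|) && decide (v < y))) = true
    · rw [if_pos hc]
      have hvy : pvLt (pvKey x v) (pvKey x y) := (pvVltB_iff x v y).mp hc
      refine List.Pairwise.cons ?_ hys
      intro z hz
      rcases List.mem_cons.mp hz with rfl | hzt
      · exact pvLe_of_lt hvy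
      · exact pvLe_of_lt_of_le hvy (List.rel_of_pairwise_cons hys hzt)
    · rw [if_neg hc]
      have hyv : pvVle x y v := fun hh => hc ((pvVltB_iff x v y).mpr hh)
      refine List.Pairwise.cons ?_ (ih hys.tail)
      intro z hz
      rcases (PySem.List.mem_insertBy _ _ _ _).mp hz with rfl | hzt
      · exact hyv
      · exact List.rel_of_pairwise_cons hys hzt

theorem pv_sorted2_pairwise (x : Int) (arr : List Int) :
    (PySem.List.sorted2 arr (fun v => |v - x|) (fun v => v) false).Pairwise (pvVle x) := by
  have H : ∀ (l : List Int) (acc : List Int), acc.Pairwise (pvVle x) →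
      (l.foldl (fun acc v => PySem.List.insertBy
        (fun a b => decide (|a - x| < |b - x|) || (!decide (|b - x| < |a - x|) && decide (a < b)))
        v acc) acc).Pairwise (pvVle x) := by
    intro l
    induction l with
    | nil => intro acc h; simpa
    | cons a t ih =>
      intro acc h
      simp only [List.foldl_cons]
      exact ih _ (pv_insertBy_pairwise x a acc h)
  exact H arr [] List.Pairwise.nil

-- ---------- a pvVle-ordered permutation is unique ----------
theorem pv_unique (x : Int) : ∀ (l₁ l₂ : List Int), l₁.Perm l₂ →
    l₁.Pairwise (pvVle x) → l₂.Pairwise (pvVle x) → l₁ = l₂ := by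
  intro l₁
  induction l₁ with
  | nil => intro l₂ hp _ _; simpa using hp.nil_eq
  | cons a t ih =>
    intro l₂ hp h1 h2
    cases l₂ with
    | nil => exact absurd hp.symm (by simp)
    | cons b s =>
      have hab : a = b := by
        have ha : a ∈ b :: s := hp.mem_iff.mp List.mem_cons_self
        have hb : b ∈ a :: t := hp.mem_iff.mpr List.mem_cons_self
        rcases List.mem_cons.mp ha with rfl | has
        · rfl
        · rcases List.mem_cons.mp hb with rfl | hbt
          · rfl
          · exact pvVle_antisymm (List.rel_of_pairwise_cons h1 hbt)
              (List.rel_of_pairwise_cons h2 has)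
      subst hab
      rw [ih s hp.cons_inv h1.tail h2.tail]

-- ---------- assembly ----------
theorem pv_main (arr : List Int) (k x : Int) (hk : k ≤ (arr.length : Int)) :
    findClosestElements_old arr k x = findClosestElements_old_alt arr k x := by
  show PySem.List.sorted
      ((PySem.List.pyRange 0 k 1).foldl (fun st _ => pvLoopStep st)
        ([], arr.foldl (fun h num => h ++ [(|num - x|, num)]) [])).1 (fun v => v) false
    = PySem.List.sorted
        (PySem.List.slice (PySem.List.sorted2 arr (fun v => |v - x|) (fun v => v) false)
          none (some (max k 0))) (fun v => v) false
  set S2 := PySem.List.sorted2 arr (fun v => |v - x|) (fun v => v) false with hS2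
  set heap := arr.foldl (fun h num => h ++ [(|num - x|, num)]) [] with hheap
  have hheap' : heap = arr.map (fun v => pvKey x v) := by
    rw [hheap, pv_heap_build]; rfl
  have hlenh : heap.length = arr.length := by rw [hheap']; simp
  set P := pvSelTake heap.length heap with hP
  have hshape : ∀ p ∈ P, p = pvKey x p.2 := by
    intro p hp
    have : p ∈ heap := (pvSelTake_perm heap).subset hp
    rw [hheap'] at this
    obtain ⟨v, _, rfl⟩ := List.mem_map.mp this
    rfl
  have hPS2 : P.map Prod.snd = S2 := by
    apply pv_unique x
    · have h1 : (P.map Prod.snd).Perm (heap.map Prod.snd) := (pvSelTake_perm heap).map _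
      have h2 : heap.map Prod.snd = arr := by
        rw [hheap']; simp [pvKey, Function.comp_def]
      exact (h2 ▸ h1).trans (PySem.List.sorted2_perm arr _ _ _).symm
    · have hpw : P.Pairwise pvLe := pvSelTake_pairwise _ heap
      rw [List.pairwise_map]
      refine hpw.imp_of_mem ?_
      intro p q hp hq hle
      unfold pvVle
      rw [← hshape p hp, ← hshape q hq]
      exact hle
    · exact pv_sorted2_pairwise x arr
  have hkn : k.toNat ≤ heap.length := by rw [hlenh]; omega
  rw [pv_foldl_ignore pvLoopStep]
  have hlenr : (PySem.List.pyRange 0 k 1).length = k.toNat := by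
    rw [PySem.List.length_pyRange_one]; simp
  rw [hlenr]
  obtain ⟨hr, hrec⟩ := pv_loop k.toNat [] heap hkn
  rw [hrec]
  simp only [List.nil_append]
  have hmax : (0 : Int) ≤ max k 0 := le_max_right _ _
  rw [PySem.List.slice_to _ hmax]
  have hmaxt : (max k 0).toNat = k.toNat := by omega
  rw [hmaxt]
  have hfinal : (pvSelTake k.toNat heap).map Prod.snd = S2.take k.toNat := by
    rw [pvSelTake_prefix k.toNat heap hkn, ← hP, List.map_take, hPS2]
  rw [hfinal]

-- ===== VERDICT (by name: the statement is the Claim_ definition above) =====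
theorem findClosestElements_old_spec : Claim_equal_findClosestElements_old := by
  intro arr k x _ hpre
  exact pv_main arr k x hpre
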